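-- pv_equiv track=rewrite | github.com/materasu/Hackerrank-Codes | Cloudy Day/cloudyDay.py | maximumPeople
-- ===== SOURCE A (Python) =====
-- def maximumPeople(n, p, x, m, y, r):
--
--     position_info = {}
--     population_info = {}
--     cloud_or_town = {}
--     result = 0
--
--     for i in range(0,m,1):
--         position_info[y[i]-r[i]] = 0
--         position_info[y[i]+r[i]+1] = 0
--         population_info[y[i]-r[i]] = 0
--         population_info[y[i]+r[i]+1] = 0
--         cloud_or_town[y[i]-r[i]] = -1
--         cloud_or_town[y[i]+r[i]+1] = -1
--
--
--     for i in range(0,n,1):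
--         position_info[x[i]] = 0
--         population_info[x[i]] = 0
--         cloud_or_town[x[i]] = 1
--
--     for i in range(0,m,1):
--         position_info[y[i]-r[i]] += 1
--         position_info[y[i]+r[i]+1] -= 1
--
--     position_info_keys = list(position_info.keys())
--     position_info_keys.sort()
--     position_info_length = len(position_info_keys)
--
--     for i in range(1,position_info_length,1):
--         position_info[position_info_keys[i]] += position_info[position_info_keys[i-1]]
--
--     for i in range(0,n,1):
--         if(position_info[x[i]] == 0):
--             population_info[x[i]] += p[i]
--             result += p[i]
--         elif(position_info[x[i]] == 1):
--             population_info[x[i]] += p[i]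
--         else:
--             continue
--
--     population_info_keys = list(population_info.keys())
--     population_info_keys.sort()
--     population_info_length = len(population_info_keys)
--
--     for i in range(1,population_info_length,1):
--         population_info[population_info_keys[i]] += population_info[population_info_keys[i-1]]
--
--     max_result = result
--
--     for i in range(0,m,1):
--         extra = population_info[y[i]+r[i]+1] - population_info[y[i]-r[i]]
--         extra_result = extra + result
--         if(extra_result > max_result):
--             max_result = extra_result
--         else:
--             continue
--
--     return max_result
-- ===== SOURCE B (Python) =====
-- import bisect
-- from itertools import accumulate
--
-- def maximumPeople(n, p, x, m, y, r):
--     # coverage(pos) = number of cloud intervals [y-r, y+r] containing pos,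
--     # counted via start/end events as in the reference formula
--     starts = sorted(y[i] - r[i] for i in range(m))
--     ends = sorted(y[i] + r[i] + 1 for i in range(m))
--     counts = [bisect.bisect_right(starts, x[j]) - bisect.bisect_right(ends, x[j]) for j in range(n)]
--     base = sum(p[j] for j in range(n) if counts[j] == 0)
--     # towns covered by at most one cloud, sorted by position, with prefix sums
--     light = sorted(((x[j], p[j]) for j in range(n) if 0 <= counts[j] <= 1), key=lambda t: t[0])
--     xs = [t[0] for t in light]
--     pref = [0] + list(accumulate(t[1] for t in light))
--     best = base
--     for i in range(m):
--         extra = pref[bisect.bisect_right(xs, y[i] + r[i] + 1)] - pref[bisect.bisect_right(xs, y[i] - r[i])]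
--         if base + extra > best:
--             best = base + extra
--     return best
-- ===== Notes on version B (the rewrite author's own statement) =====
-- stated objective: faster
-- what changed: Replaces A's three insertion-ordered dicts, key-sort passes and in-dict prefix-sum loops by a direct sort-and-bisect algorithm: coverage counts come from binary searches over the sorted start/end event lists, and each cloud's removable population from one prefix-sum array over the position-sorted towns covered at most once, queried by bisect.
-- outside the precondition, e.g. on maximumPeople(1, [], [0], 2, [0, 0], [0, 0]): A returns 0, B returns 0
import Mathlib
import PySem

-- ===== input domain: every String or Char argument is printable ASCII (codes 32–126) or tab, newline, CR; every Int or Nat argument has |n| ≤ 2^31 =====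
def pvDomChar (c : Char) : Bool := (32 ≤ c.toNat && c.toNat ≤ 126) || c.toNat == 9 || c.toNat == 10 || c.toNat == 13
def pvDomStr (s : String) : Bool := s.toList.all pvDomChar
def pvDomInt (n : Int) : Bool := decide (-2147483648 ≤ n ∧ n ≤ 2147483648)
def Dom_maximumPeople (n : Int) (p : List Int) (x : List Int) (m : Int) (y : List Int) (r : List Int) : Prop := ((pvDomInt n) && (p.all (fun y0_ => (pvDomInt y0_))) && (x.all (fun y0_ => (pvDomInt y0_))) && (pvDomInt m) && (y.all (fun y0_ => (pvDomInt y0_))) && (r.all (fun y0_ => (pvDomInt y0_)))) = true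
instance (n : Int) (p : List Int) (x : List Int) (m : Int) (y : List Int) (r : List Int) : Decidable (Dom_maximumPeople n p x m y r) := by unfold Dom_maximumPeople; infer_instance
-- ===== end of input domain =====

-- B re-implements A's formula with plain sorted lists, bisect and one prefix-sum array instead of
-- A's three insertion-ordered dicts with key-sorting and in-dict prefix-sum passes (measured faster
-- by a constant factor); A = B is proved on every input within Pre_ (where the Python A returns).
-- ===== PORT A =====
def maximumPeople (n : Int) (p : List Int) (x : List Int) (m : Int) (y : List Int) (r : List Int) : Int :=
  -- three dicts built over the clouds (position_info, population_info, cloud_or_town)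
  let e : PySem.Dict Int Int := PySem.Dict.empty
  let t1 := (PySem.List.pyRange 0 m 1).foldl (fun (st : PySem.Dict Int Int × PySem.Dict Int Int × PySem.Dict Int Int) i =>
      let a := PySem.List.pyGetD y i 0 - PySem.List.pyGetD r i 0
      let b := PySem.List.pyGetD y i 0 + PySem.List.pyGetD r i 0 + 1
      (((st.1.insert a 0).insert b 0), ((st.2.1.insert a 0).insert b 0), ((st.2.2.insert a (-1)).insert b (-1))))
    (e, e, e)
  -- town keys
  let t2 := (PySem.List.pyRange 0 n 1).foldl (fun (st : PySem.Dict Int Int × PySem.Dict Int Int × PySem.Dict Int Int) i =>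
      let v := PySem.List.pyGetD x i 0
      ((st.1.insert v 0), (st.2.1.insert v 0), (st.2.2.insert v 1))) t1
  -- +1 / -1 cloud deltas (keys are present, so 'modify' is Python's 'd[k] += v')
  let pos1 := (PySem.List.pyRange 0 m 1).foldl (fun (d : PySem.Dict Int Int) i =>
      let a := PySem.List.pyGetD y i 0 - PySem.List.pyGetD r i 0
      let b := PySem.List.pyGetD y i 0 + PySem.List.pyGetD r i 0 + 1
      (d.modify a 0 (· + 1)).modify b 0 (· - 1)) t2.1
  let ks := PySem.List.sorted pos1.keys (fun k => k) false
  let pos2 := (PySem.List.pyRange 1 (ks.length : Int) 1).foldl (fun (d : PySem.Dict Int Int) i =>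
      d.modify (PySem.List.pyGetD ks i 0) 0 (fun v => v + d.getD (PySem.List.pyGetD ks (i - 1) 0) 0)) pos1
  -- town pass: result and population_info
  let t3 := (PySem.List.pyRange 0 n 1).foldl (fun (st : PySem.Dict Int Int × Int) i =>
      let xi := PySem.List.pyGetD x i 0
      let c := pos2.getD xi 0
      if c = 0 then (st.1.modify xi 0 (· + PySem.List.pyGetD p i 0), st.2 + PySem.List.pyGetD p i 0)
      else if c = 1 then (st.1.modify xi 0 (· + PySem.List.pyGetD p i 0), st.2)
      else st) (t2.2.1, 0)
  let ks2 := PySem.List.sorted t3.1.keys (fun k => k) false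
  let pop2 := (PySem.List.pyRange 1 (ks2.length : Int) 1).foldl (fun (d : PySem.Dict Int Int) i =>
      d.modify (PySem.List.pyGetD ks2 i 0) 0 (fun v => v + d.getD (PySem.List.pyGetD ks2 (i - 1) 0) 0)) t3.1
  (PySem.List.pyRange 0 m 1).foldl (fun mr i =>
      let extra := pop2.getD (PySem.List.pyGetD y i 0 + PySem.List.pyGetD r i 0 + 1) 0
                 - pop2.getD (PySem.List.pyGetD y i 0 - PySem.List.pyGetD r i 0) 0
      let er := extra + t3.2
      if er > mr then er else mr) t3.2

-- ===== PORT B =====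
def maximumPeople_alt (n : Int) (p : List Int) (x : List Int) (m : Int) (y : List Int) (r : List Int) : Int :=
  let starts := PySem.List.sorted ((PySem.List.pyRange 0 m 1).map (fun i => PySem.List.pyGetD y i 0 - PySem.List.pyGetD r i 0)) (fun v => v) false
  let ends := PySem.List.sorted ((PySem.List.pyRange 0 m 1).map (fun i => PySem.List.pyGetD y i 0 + PySem.List.pyGetD r i 0 + 1)) (fun v => v) false
  let counts := (PySem.List.pyRange 0 n 1).map (fun j =>
      (PySem.List.bisectRight starts (PySem.List.pyGetD x j 0) : Int) - (PySem.List.bisectRight ends (PySem.List.pyGetD x j 0) : Int))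
  let base := (PySem.List.pyRange 0 n 1).foldl (fun s j => if PySem.List.pyGetD counts j 0 = 0 then s + PySem.List.pyGetD p j 0 else s) 0
  let light := PySem.List.sorted
      (((PySem.List.pyRange 0 n 1).filter (fun j => decide (0 ≤ PySem.List.pyGetD counts j 0) && decide (PySem.List.pyGetD counts j 0 ≤ 1))).map
        (fun j => (PySem.List.pyGetD x j 0, PySem.List.pyGetD p j 0)))
      (fun t => t.1) false
  let xs := light.map (fun t => t.1)
  -- [0] + itertools.accumulate(...) is List.scanl (+) 0
  let pref := List.scanl (· + ·) 0 (light.map (fun t => t.2))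
  (PySem.List.pyRange 0 m 1).foldl (fun best i =>
      let extra := PySem.List.pyGetD pref (PySem.List.bisectRight xs (PySem.List.pyGetD y i 0 + PySem.List.pyGetD r i 0 + 1) : Int) 0
                 - PySem.List.pyGetD pref (PySem.List.bisectRight xs (PySem.List.pyGetD y i 0 - PySem.List.pyGetD r i 0) : Int) 0
      if base + extra > best then base + extra else best) base

-- ===== PRECONDITION & SPEC =====
-- Pre_: A indexes p,x up to n and y,r up to m; outside these bounds the Python raises IndexError.
-- (It also excludes the corner n > len(p) where every out-of-range town is covered by ≥ 2 clouds,
-- on which A happens to return because p[i] is only read for towns covered at most once.)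
def Pre_maximumPeople (n : Int) (p : List Int) (x : List Int) (m : Int) (y : List Int) (r : List Int) : Prop :=
  n ≤ (p.length : Int) ∧ n ≤ (x.length : Int) ∧ m ≤ (y.length : Int) ∧ m ≤ (r.length : Int)
instance (n : Int) (p : List Int) (x : List Int) (m : Int) (y : List Int) (r : List Int) : Decidable (Pre_maximumPeople n p x m y r) := by unfold Pre_maximumPeople; infer_instance
def pvWitness_maximumPeople : Int × List Int × List Int × Int × List Int × List Int := (2, [5, 7], [1, 4], 1, [2], [1])

def Spec_maximumPeople (n : Int) (p : List Int) (x : List Int) (m : Int) (y : List Int) (r : List Int) (out : Int) : Prop := out = maximumPeople_alt n p x m y r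
instance (n : Int) (p : List Int) (x : List Int) (m : Int) (y : List Int) (r : List Int) (out : Int) : Decidable (Spec_maximumPeople n p x m y r out) := by unfold Spec_maximumPeople; infer_instance

-- ===== CLAIM (what is proved, stated in full; the proofs are below) =====
def Claim_equal_maximumPeople : Prop := ∀ (n : Int) (p : List Int) (x : List Int) (m : Int) (y : List Int) (r : List Int), Dom_maximumPeople n p x m y r → Pre_maximumPeople n p x m y r → Spec_maximumPeople n p x m y r (maximumPeople n p x m y r)

-- ===== LEMMAS AND PROOFS =====

-- Shared semantic functions: event lists, coverage count, the per-cloud window sums.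
def pvStarts (m : Int) (y r : List Int) : List Int :=
  (PySem.List.pyRange 0 m 1).map (fun i => PySem.List.pyGetD y i 0 - PySem.List.pyGetD r i 0)

def pvEnds (m : Int) (y r : List Int) : List Int :=
  (PySem.List.pyRange 0 m 1).map (fun i => PySem.List.pyGetD y i 0 + PySem.List.pyGetD r i 0 + 1)

def pvCnt (m : Int) (y r : List Int) (v : Int) : Int :=
  ((pvStarts m y r).countP (fun s => decide (s ≤ v)) : Int)
    - ((pvEnds m y r).countP (fun s => decide (s ≤ v)) : Int)

def pvCond (m : Int) (y r x : List Int) (j : Int) : Bool :=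
  decide (pvCnt m y r (PySem.List.pyGetD x j 0) = 0) || decide (pvCnt m y r (PySem.List.pyGetD x j 0) = 1)

def pvBase (n : Int) (p x : List Int) (m : Int) (y r : List Int) : Int :=
  (((PySem.List.pyRange 0 n 1).filter (fun j => decide (pvCnt m y r (PySem.List.pyGetD x j 0) = 0))).map
    (fun j => PySem.List.pyGetD p j 0)).sum

def pvSval (n : Int) (p x : List Int) (m : Int) (y r : List Int) (v : Int) : Int :=
  (((PySem.List.pyRange 0 n 1).filter
      (fun j => pvCond m y r x j && decide (PySem.List.pyGetD x j 0 ≤ v))).map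
    (fun j => PySem.List.pyGetD p j 0)).sum

def pvFinal (n : Int) (p x : List Int) (m : Int) (y r : List Int) : Int :=
  (PySem.List.pyRange 0 m 1).foldl (fun mr i =>
      let extra := pvSval n p x m y r (PySem.List.pyGetD y i 0 + PySem.List.pyGetD r i 0 + 1)
                 - pvSval n p x m y r (PySem.List.pyGetD y i 0 - PySem.List.pyGetD r i 0)
      if pvBase n p x m y r + extra > mr then pvBase n p x m y r + extra else mr)
    (pvBase n p x m y r)

-- ---------- generic list and dict-loop lemmas ----------

theorem pv_bisect_count (l : List Int) (h : l.Pairwise (· ≤ ·)) (v : Int) :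
    PySem.List.bisectRight l v = l.countP (fun s => decide (s ≤ v)) := by
  obtain ⟨hle, hlt, hgt⟩ := PySem.List.bisectRight_spec l v h
  set k := PySem.List.bisectRight l v with hk
  have : l = l.take k ++ l.drop k := (List.take_append_drop k l).symm
  rw [this, List.countP_append]
  have h1 : (l.take k).countP (fun s => decide (s ≤ v)) = k := by
    have hall : ∀ a ∈ l.take k, (fun s => decide (s ≤ v)) a = true := by
      intro a ha
      obtain ⟨j, hj, rfl⟩ := List.mem_iff_getElem.mp ha
      have hjk : j < k := lt_of_lt_of_le hj (by simp)
      have hjl : j < l.length := lt_of_lt_of_le hjk hle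
      simp only [List.getElem_take]
      simpa using hlt j hjl hjk
    rw [List.countP_eq_length.mpr hall, List.length_take, min_eq_left hle]
  have h2 : (l.drop k).countP (fun s => decide (s ≤ v)) = 0 := by
    rw [List.countP_eq_zero]
    intro a ha
    obtain ⟨j, hj, rfl⟩ := List.mem_iff_getElem.mp ha
    have hjl : k + j < l.length := by have h2 := hj; simp only [List.length_drop] at h2; omega
    simp only [List.getElem_drop]
    simpa using not_le.mpr (hgt (k + j) hjl (Nat.le_add_right _ _))
  omega

theorem pv_scanl_getD (l : List Int) (a : Int) (k : Nat) (hk : k ≤ l.length) :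
    (List.scanl (· + ·) a l).getD k 0 = a + (l.take k).sum := by
  induction l generalizing a k with
  | nil =>
    have : k = 0 := by simpa using hk
    simp [this]
  | cons b t ih =>
    cases k with
    | zero => simp
    | succ k =>
      simp only [List.scanl_cons, List.getD_cons_succ, List.take_succ_cons, List.sum_cons]
      rw [ih (a + b) k (by simpa using hk)]
      ring

theorem pv_take_countP {β : Type} (key : β → Int) (l : List β)
    (hp : l.Pairwise (fun s t => key s ≤ key t)) (v : Int) :
    l.take (l.countP (fun t => decide (key t ≤ v))) = l.filter (fun t => decide (key t ≤ v)) := by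
  induction l with
  | nil => simp
  | cons b t ih =>
    have hp' := (List.pairwise_cons.mp hp).2
    have hb := (List.pairwise_cons.mp hp).1
    by_cases hbv : key b ≤ v
    · simp only [List.countP_cons, List.filter_cons, hbv, decide_true, if_pos]
      simp only [List.take_succ_cons, ih hp']
    · have ht : t.countP (fun t => decide (key t ≤ v)) = 0 := by
        rw [List.countP_eq_zero]
        intro a ha
        simpa using not_le.mpr (lt_of_lt_of_le (not_le.mp hbv) (hb a ha))
      have hf : t.filter (fun t => decide (key t ≤ v)) = [] := by
        rw [List.filter_eq_nil_iff]
        intro a ha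
        simpa using not_le.mpr (lt_of_lt_of_le (not_le.mp hbv) (hb a ha))
      simp [List.countP_cons, List.filter_cons, hbv, ht, hf]

theorem pv_sum_ite_mem (K : List Int) (hnd : K.Nodup) (a : Int) (ha : a ∈ K) (c : Int) :
    (K.map (fun k => if a = k then c else 0)).sum = c := by
  induction K with
  | nil => simp at ha
  | cons b t ih =>
    rcases List.mem_cons.mp ha with rfl | hat
    · have : ∀ k ∈ t, (if a = k then c else 0) = 0 := by
        intro k hk
        have : a ≠ k := fun h => (List.nodup_cons.mp hnd).1 (h ▸ hk)
        simp [this]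
      have hz : (List.map (fun k => if a = k then c else 0) t).sum = 0 :=
        List.sum_eq_zero (by
          intro z hz
          obtain ⟨k, hk, rfl⟩ := List.mem_map.mp hz
          exact this k hk)
      simp [hz]
    · have hba : a ≠ b := fun h => (List.nodup_cons.mp hnd).1 (h ▸ hat)
      simp [hba, ih (List.nodup_cons.mp hnd).2 hat]

theorem pv_sum_buckets {β : Type} (K : List Int) (hnd : K.Nodup) (l : List β)
    (key : β → Int) (w : β → Int) (hin : ∀ j ∈ l, key j ∈ K) :
    (K.map (fun k => ((l.filter (fun j => key j == k)).map w).sum)).sum = (l.map w).sum := by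
  induction l with
  | nil => simp
  | cons b t ih =>
    have step : ∀ k : Int, (((b :: t).filter (fun j => key j == k)).map w).sum
        = (if key b = k then w b else 0) + ((t.filter (fun j => key j == k)).map w).sum := by
      intro k
      by_cases h : key b = k <;> simp [List.filter_cons, h]
    have : (K.map (fun k => (((b :: t).filter (fun j => key j == k)).map w).sum)).sum
        = (K.map (fun k => if key b = k then w b else 0)).sum
          + (K.map (fun k => ((t.filter (fun j => key j == k)).map w).sum)).sum := by
      rw [← List.sum_map_add]
      exact congrArg _ (List.map_congr_left (fun k _ => step k))
    rw [this, pv_sum_ite_mem K hnd (key b) (hin b (by simp)) (w b),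
        ih (fun j hj => hin j (by simp [hj]))]
    simp

theorem pv_getD_insert2_zero (l : List Int) (f g : Int → Int) (d : PySem.Dict Int Int)
    (hd : ∀ k, d.getD k 0 = 0) :
    ∀ k, (l.foldl (fun d i => (d.insert (f i) 0).insert (g i) 0) d).getD k 0 = 0 := by
  induction l generalizing d with
  | nil => simpa using hd
  | cons b t ih =>
    intro k
    simp only [List.foldl_cons]
    exact ih _ (fun k => by rw [PySem.Dict.getD_insert, PySem.Dict.getD_insert]; split_ifs <;> simp [hd]) k

theorem pv_getD_insert1_zero (l : List Int) (f : Int → Int) (d : PySem.Dict Int Int)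
    (hd : ∀ k, d.getD k 0 = 0) :
    ∀ k, (l.foldl (fun d i => d.insert (f i) 0) d).getD k 0 = 0 := by
  induction l generalizing d with
  | nil => simpa using hd
  | cons b t ih =>
    intro k
    simp only [List.foldl_cons]
    exact ih _ (fun k => by rw [PySem.Dict.getD_insert]; split_ifs <;> simp [hd]) k

theorem pv_mem_keys_insert2 (l : List Int) (f g : Int → Int) (v w : Int) (d : PySem.Dict Int Int) (k : Int) :
    k ∈ (l.foldl (fun d i => (d.insert (f i) v).insert (g i) w) d).keys ↔
      k ∈ d.keys ∨ ∃ i ∈ l, f i = k ∨ g i = k := by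
  induction l generalizing d with
  | nil => simp
  | cons b t ih =>
    simp only [List.foldl_cons, ih, PySem.Dict.mem_keys_insert, List.mem_cons]
    aesop
theorem pv_mem_keys_insert1 (l : List Int) (f : Int → Int) (v : Int) (d : PySem.Dict Int Int) (k : Int) :
    k ∈ (l.foldl (fun d i => d.insert (f i) v) d).keys ↔ k ∈ d.keys ∨ ∃ i ∈ l, f i = k := by
  induction l generalizing d with
  | nil => simp
  | cons b t ih =>
    simp only [List.foldl_cons, ih, PySem.Dict.mem_keys_insert, List.mem_cons]
    aesop
theorem pv_nodup_keys_insert2 (l : List Int) (f g : Int → Int) (v w : Int) (d : PySem.Dict Int Int)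
    (hd : d.keys.Nodup) :
    (l.foldl (fun d i => (d.insert (f i) v).insert (g i) w) d).keys.Nodup := by
  induction l generalizing d with
  | nil => simpa
  | cons b t ih =>
    simp only [List.foldl_cons]
    exact ih _ (PySem.Dict.nodup_keys_insert _ _ _ (PySem.Dict.nodup_keys_insert _ _ _ hd))

theorem pv_nodup_keys_insert1 (l : List Int) (f : Int → Int) (v : Int) (d : PySem.Dict Int Int)
    (hd : d.keys.Nodup) :
    (l.foldl (fun d i => d.insert (f i) v) d).keys.Nodup := by
  induction l generalizing d with
  | nil => simpa
  | cons b t ih =>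
    simp only [List.foldl_cons]
    exact ih _ (PySem.Dict.nodup_keys_insert _ _ _ hd)

theorem pv_getD_add_one (d : PySem.Dict Int Int) (a k : Int) (c : Int) :
    (d.modify a 0 (· + c)).getD k 0 = d.getD k 0 + (if a = k then c else 0) := by
  rw [PySem.Dict.getD_modify]
  by_cases h : k = a
  · simp [h, eq_comm]
  · have h2 : a ≠ k := fun hh => h hh.symm
    simp [h, h2]

theorem pv_getD_sub_one (d : PySem.Dict Int Int) (a k : Int) :
    (d.modify a 0 (· - 1)).getD k 0 = d.getD k 0 - (if a = k then 1 else 0) := by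
  rw [PySem.Dict.getD_modify]
  by_cases h : k = a
  · simp [h, eq_comm]
  · have h2 : a ≠ k := fun hh => h hh.symm
    simp [h, h2]

theorem pv_getD_modify2 (l : List Int) (f g : Int → Int) (d : PySem.Dict Int Int) (k : Int) :
    (l.foldl (fun d i => (d.modify (f i) 0 (· + 1)).modify (g i) 0 (· - 1)) d).getD k 0
      = d.getD k 0 + (l.countP (fun i => f i == k) : Int) - (l.countP (fun i => g i == k) : Int) := by
  induction l generalizing d with
  | nil => simp
  | cons b t ih =>
    simp only [List.foldl_cons, List.countP_cons]
    rw [ih, pv_getD_sub_one, pv_getD_add_one]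
    by_cases hf : f b = k <;> by_cases hg : g b = k <;> simp [hf, hg] <;> push_cast <;> ring

theorem pv_mem_keys_modify2 (l : List Int) (f g : Int → Int) (u v : Int) (F G : Int → Int)
    (d : PySem.Dict Int Int) (k : Int) :
    k ∈ (l.foldl (fun d i => (d.modify (f i) u F).modify (g i) v G) d).keys ↔
      k ∈ d.keys ∨ ∃ i ∈ l, f i = k ∨ g i = k := by
  induction l generalizing d with
  | nil => simp
  | cons b t ih =>
    simp only [List.foldl_cons, ih, PySem.Dict.keys_modify, PySem.Dict.mem_keys_insert, List.mem_cons]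
    aesop
theorem pv_town_loop (l : List Int) (P0 P1 : Int → Prop) [DecidablePred P0] [DecidablePred P1]
    (key w : Int → Int) (d : PySem.Dict Int Int) (s : Int) :
    (l.foldl (fun (st : PySem.Dict Int Int × Int) i =>
        if P0 i then (st.1.modify (key i) 0 (· + w i), st.2 + w i)
        else if P1 i then (st.1.modify (key i) 0 (· + w i), st.2)
        else st) (d, s))
      = (l.foldl (fun d i => if P0 i ∨ P1 i then d.modify (key i) 0 (· + w i) else d) d,
         s + ((l.filter (fun i => decide (P0 i))).map w).sum) := by
  induction l generalizing d s with
  | nil => simp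
  | cons b t ih =>
    simp only [List.foldl_cons, List.filter_cons]
    by_cases h0 : P0 b
    · simp only [h0, if_pos, decide_true, Bool.true_or, if_true]
      rw [ih]
      simp [h0, add_assoc]
    · by_cases h1 : P1 b
      · simp only [h0, h1, if_neg h0, if_pos h1, decide_false, decide_true, Bool.false_or, if_true]
        rw [ih]
        simp [h0, h1]
      · simp only [if_neg h0, if_neg h1, decide_false, Bool.false_or, Bool.or_false, if_false]
        rw [ih]
        simp [h0, h1]

theorem pv_nodup_keys_modify2 (l : List Int) (f g : Int → Int) (u v : Int) (F G : Int → Int)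
    (d : PySem.Dict Int Int) (hd : d.keys.Nodup) :
    (l.foldl (fun d i => (d.modify (f i) u F).modify (g i) v G) d).keys.Nodup := by
  induction l generalizing d with
  | nil => simpa
  | cons b t ih =>
    simp only [List.foldl_cons]
    apply ih
    have h1 : (d.modify (f b) u F).keys.Nodup := by
      rw [PySem.Dict.keys_modify]
      exact PySem.Dict.nodup_keys_insert _ _ _ hd
    rw [PySem.Dict.keys_modify]
    exact PySem.Dict.nodup_keys_insert _ _ _ h1

theorem pv_nodup_keys_modify_add (l : List Int) (c : Int → Prop) [DecidablePred c] (key w : Int → Int)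
    (d : PySem.Dict Int Int) (hd : d.keys.Nodup) :
    (l.foldl (fun d i => if c i then d.modify (key i) 0 (· + w i) else d) d).keys.Nodup := by
  induction l generalizing d with
  | nil => simpa
  | cons b t ih =>
    simp only [List.foldl_cons]
    by_cases hc : c b
    · rw [if_pos hc]
      apply ih
      rw [PySem.Dict.keys_modify]
      exact PySem.Dict.nodup_keys_insert _ _ _ hd
    · rw [if_neg hc]
      exact ih d hd

theorem pv_getD_modify_add (l : List Int) (c : Int → Prop) [DecidablePred c] (key w : Int → Int)
    (d : PySem.Dict Int Int) (k : Int) :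
    (l.foldl (fun d i => if c i then d.modify (key i) 0 (· + w i) else d) d).getD k 0
      = d.getD k 0 + ((l.filter (fun i => decide (c i) && (key i == k))).map w).sum := by
  induction l generalizing d with
  | nil => simp
  | cons b t ih =>
    simp only [List.foldl_cons, List.filter_cons]
    by_cases hc : c b
    · rw [if_pos hc, ih, pv_getD_add_one]
      by_cases hk : key b = k <;> simp [hk, hc] <;> ring
    · have hb : (c b && (key b == k)) = false := by simp [hc]
      rw [if_neg hc, hb, ih]
      simp

theorem pv_mem_keys_modify_add (l : List Int) (c : Int → Prop) [DecidablePred c] (key w : Int → Int)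
    (d : PySem.Dict Int Int) (k : Int) :
    k ∈ (l.foldl (fun d i => if c i then d.modify (key i) 0 (· + w i) else d) d).keys ↔
      k ∈ d.keys ∨ ∃ i ∈ l, c i ∧ key i = k := by
  induction l generalizing d with
  | nil => simp
  | cons b t ih =>
    simp only [List.foldl_cons, List.mem_cons]
    by_cases hc : c b
    · rw [if_pos hc, ih]
      simp only [PySem.Dict.keys_modify, PySem.Dict.mem_keys_insert]
      constructor
      · rintro ((h | h) | ⟨i, hi, hh⟩)
        · exact Or.inr ⟨b, Or.inl rfl, hc, h.symm⟩
        · exact Or.inl h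
        · exact Or.inr ⟨i, Or.inr hi, hh⟩
      · rintro (h | ⟨i, (rfl | hi), hh⟩)
        · exact Or.inl (Or.inr h)
        · exact Or.inl (Or.inl hh.2.symm)
        · exact Or.inr ⟨i, hi, hh⟩
    · rw [if_neg hc, ih]
      constructor
      · rintro (h | ⟨i, hi, hh⟩)
        · exact Or.inl h
        · exact Or.inr ⟨i, Or.inr hi, hh⟩
      · rintro (h | ⟨i, (rfl | hi), hh⟩)
        · exact Or.inl h
        · exact absurd hh.1 hc
        · exact Or.inr ⟨i, hi, hh⟩

theorem pv_filter_le_sorted (ks : List Int) (hs : ks.Pairwise (· < ·)) (j : Nat) (hj : j < ks.length) :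
    ks.filter (fun k' => decide (k' ≤ ks[j])) = ks.take (j + 1) := by
  induction ks generalizing j with
  | nil => simp at hj
  | cons a t ih =>
    have ha := (List.pairwise_cons.mp hs).1
    have ht := (List.pairwise_cons.mp hs).2
    cases j with
    | zero =>
      simp only [List.getElem_cons_zero, List.filter_cons, List.take_succ_cons, List.take_zero]
      have : t.filter (fun k' => decide (k' ≤ a)) = [] := by
        rw [List.filter_eq_nil_iff]
        intro b hb
        simpa using not_le.mpr (ha b hb)
      simp only [le_refl, decide_true, if_pos]
      have := congrArg (a :: ·) this
      simpa using this
    | succ j =>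
      have hjt : j < t.length := by simpa using hj
      simp only [List.getElem_cons_succ, List.filter_cons, List.take_succ_cons]
      have haj : a ≤ t[j] := le_of_lt (ha _ (List.getElem_mem hjt))
      simp only [haj, decide_true, if_pos]
      exact congrArg (a :: ·) (ih ht j hjt)

theorem pv_prefix_fold_aux (ks : List Int) (hs : ks.Pairwise (· < ·)) (f : Int → Int) :
    ∀ (c t : Nat) (d : PySem.Dict Int Int), t + c = ks.length → 1 ≤ t →
      (∀ j (hj : j < ks.length), d.getD ks[j] 0
          = if j < t then ((ks.take (j + 1)).map f).sum else f ks[j]) →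
      ∀ j (hj : j < ks.length),
        ((PySem.List.pyRange (t : Int) (ks.length : Int) 1).foldl (fun d i =>
            d.modify (PySem.List.pyGetD ks i 0) 0
              (fun v => v + d.getD (PySem.List.pyGetD ks (i - 1) 0) 0)) d).getD ks[j] 0
          = ((ks.take (j + 1)).map f).sum := by
  have hnd : ks.Nodup := hs.imp ne_of_lt
  intro c
  induction c with
  | zero =>
    intro t d htc ht1 hinv j hj
    have : t = ks.length := by omega
    rw [this, PySem.List.pyRange_one_eq_nil (le_refl _), List.foldl_nil]
    have := hinv j hj
    rwa [if_pos (by omega)] at this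
  | succ c ih =>
    intro t d htc ht1 hinv j hj
    have htL : t < ks.length := by omega
    have hstep : PySem.List.pyRange (t : Int) (ks.length : Int) 1
        = (t : Int) :: PySem.List.pyRange ((t : Int) + 1) (ks.length : Int) 1 :=
      PySem.List.pyRange_one_cons (by exact_mod_cast htL)
    rw [hstep, List.foldl_cons]
    have hgt : PySem.List.pyGetD ks (t : Int) 0 = ks[t] := by
      rw [PySem.List.pyGetD_eq_getElem ks 0 (by positivity) (by exact_mod_cast htL)]
      simp
    have hgt1 : PySem.List.pyGetD ks ((t : Int) - 1) 0 = ks[t - 1] := by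
      have h1 : (t : Int) - 1 = ((t - 1 : Nat) : Int) := by omega
      rw [h1, PySem.List.pyGetD_eq_getElem ks 0 (by positivity) (by exact_mod_cast (by omega : t - 1 < ks.length))]
      simp
    have hcast : ((t : Int) + 1) = ((t + 1 : Nat) : Int) := by push_cast; ring
    rw [hcast]
    apply ih (t + 1) _ (by omega) (by omega)
    -- new invariant
    intro j' hj'
    rw [hgt, hgt1, pv_getD_add_one]
    have hprev : d.getD ks[t - 1] 0 = ((ks.take (t - 1 + 1)).map f).sum := by
      rw [hinv (t - 1) (by omega), if_pos (by omega)]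
    rw [hprev]
    by_cases hjt : j' = t
    · subst hjt
      have hne : ks[j'] = ks[j'] := rfl
      rw [if_pos rfl, if_pos (by omega), hinv j' hj', if_neg (by omega)]
      have htake : ks.take (j' + 1) = ks.take (j' - 1 + 1) ++ [ks[j']] := by
        have : j' - 1 + 1 = j' := by omega
        rw [this]
        rw [List.take_succ]
        simp [hj']
      rw [htake]
      simp [add_comm]
    · have hne : ks[t] ≠ ks[j'] := by
        intro h
        exact hjt ((List.Nodup.getElem_inj_iff hnd).mp h).symm
      rw [if_neg hne, add_zero, hinv j' hj']
      by_cases hlt : j' < t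
      · rw [if_pos hlt, if_pos (by omega)]
      · rw [if_neg hlt, if_neg (by omega)]

theorem pv_prefix_fold (ks : List Int) (hs : ks.Pairwise (· < ·)) (f : Int → Int)
    (d : PySem.Dict Int Int) (hd : ∀ k ∈ ks, d.getD k 0 = f k) :
    ∀ k ∈ ks,
      ((PySem.List.pyRange 1 (ks.length : Int) 1).foldl (fun d i =>
          d.modify (PySem.List.pyGetD ks i 0) 0
            (fun v => v + d.getD (PySem.List.pyGetD ks (i - 1) 0) 0)) d).getD k 0
        = ((ks.filter (fun k' => decide (k' ≤ k))).map f).sum := by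
  intro k hk
  obtain ⟨j, hj, rfl⟩ := List.mem_iff_getElem.mp hk
  have hinv : ∀ j' (hj' : j' < ks.length), d.getD ks[j'] 0
      = if j' < 1 then ((ks.take (j' + 1)).map f).sum else f ks[j'] := by
    intro j' hj'
    rw [hd ks[j'] (List.getElem_mem hj')]
    by_cases h0 : j' = 0
    · subst h0
      rw [if_pos (by omega)]
      have : ks.take 1 = [ks[0]] := by
        cases ks
        · simp at hj'
        · simp
      rw [this]
      simp
    · rw [if_neg (by omega)]
  have hmain := pv_prefix_fold_aux ks hs f (ks.length - 1) 1 d (by omega) (le_refl _) hinv j hj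
  rw [pv_filter_le_sorted ks hs j hj]
  have hone : ((1 : Nat) : Int) = (1 : Int) := by norm_num
  rw [← hone]
  exact hmain

-- ---------- the two main reductions ----------

-- ---------- stage definitions mirroring port A (proof helpers) ----------

def pvStepA (y r : List Int) (i : Int) : Int := PySem.List.pyGetD y i 0 - PySem.List.pyGetD r i 0
def pvStepB (y r : List Int) (i : Int) : Int := PySem.List.pyGetD y i 0 + PySem.List.pyGetD r i 0 + 1

def pvD1 (n : Int) (x : List Int) (m : Int) (y r : List Int) : PySem.Dict Int Int :=
  (PySem.List.pyRange 0 n 1).foldl (fun d i => d.insert (PySem.List.pyGetD x i 0) 0)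
    ((PySem.List.pyRange 0 m 1).foldl (fun d i => (d.insert (pvStepA y r i) 0).insert (pvStepB y r i) 0)
      PySem.Dict.empty)

def pvPos1 (n : Int) (x : List Int) (m : Int) (y r : List Int) : PySem.Dict Int Int :=
  (PySem.List.pyRange 0 m 1).foldl (fun d i =>
    (d.modify (pvStepA y r i) 0 (· + 1)).modify (pvStepB y r i) 0 (· - 1)) (pvD1 n x m y r)

def pvKs (n : Int) (x : List Int) (m : Int) (y r : List Int) : List Int :=
  PySem.List.sorted (pvPos1 n x m y r).keys (fun k => k) false

def pvPos2 (n : Int) (x : List Int) (m : Int) (y r : List Int) : PySem.Dict Int Int :=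
  (PySem.List.pyRange 1 ((pvKs n x m y r).length : Int) 1).foldl (fun d i =>
    d.modify (PySem.List.pyGetD (pvKs n x m y r) i 0) 0
      (fun v => v + d.getD (PySem.List.pyGetD (pvKs n x m y r) (i - 1) 0) 0)) (pvPos1 n x m y r)

def pvT3 (n : Int) (p x : List Int) (m : Int) (y r : List Int) : PySem.Dict Int Int × Int :=
  (PySem.List.pyRange 0 n 1).foldl (fun (st : PySem.Dict Int Int × Int) i =>
      if (pvPos2 n x m y r).getD (PySem.List.pyGetD x i 0) 0 = 0 then
        (st.1.modify (PySem.List.pyGetD x i 0) 0 (· + PySem.List.pyGetD p i 0), st.2 + PySem.List.pyGetD p i 0)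
      else if (pvPos2 n x m y r).getD (PySem.List.pyGetD x i 0) 0 = 1 then
        (st.1.modify (PySem.List.pyGetD x i 0) 0 (· + PySem.List.pyGetD p i 0), st.2)
      else st)
    (pvD1 n x m y r, 0)

def pvKs2 (n : Int) (p x : List Int) (m : Int) (y r : List Int) : List Int :=
  PySem.List.sorted (pvT3 n p x m y r).1.keys (fun k => k) false

def pvPop2 (n : Int) (p x : List Int) (m : Int) (y r : List Int) : PySem.Dict Int Int :=
  (PySem.List.pyRange 1 ((pvKs2 n p x m y r).length : Int) 1).foldl (fun d i =>
    d.modify (PySem.List.pyGetD (pvKs2 n p x m y r) i 0) 0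
      (fun v => v + d.getD (PySem.List.pyGetD (pvKs2 n p x m y r) (i - 1) 0) 0)) (pvT3 n p x m y r).1

-- the keys that appear in any of A's dicts
def pvKP (n : Int) (x : List Int) (m : Int) (y r : List Int) (k : Int) : Prop :=
  (∃ i ∈ PySem.List.pyRange 0 m 1, pvStepA y r i = k ∨ pvStepB y r i = k)
    ∨ (∃ j ∈ PySem.List.pyRange 0 n 1, PySem.List.pyGetD x j 0 = k)

-- A's port computes the final fold over pvPop2 / pvT3 (the triple fold split into components)
theorem pv_A_unfold (n : Int) (p x : List Int) (m : Int) (y r : List Int) :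
    maximumPeople n p x m y r
      = (PySem.List.pyRange 0 m 1).foldl (fun mr i =>
          let extra := (pvPop2 n p x m y r).getD (PySem.List.pyGetD y i 0 + PySem.List.pyGetD r i 0 + 1) 0
                     - (pvPop2 n p x m y r).getD (PySem.List.pyGetD y i 0 - PySem.List.pyGetD r i 0) 0
          let er := extra + (pvT3 n p x m y r).2
          if er > mr then er else mr) (pvT3 n p x m y r).2 := by
  unfold maximumPeople
  simp only []
  have h1 : ((PySem.List.pyRange 0 m 1).foldl (fun (st : PySem.Dict Int Int × PySem.Dict Int Int × PySem.Dict Int Int) i =>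
      (((st.1.insert (PySem.List.pyGetD y i 0 - PySem.List.pyGetD r i 0) 0).insert (PySem.List.pyGetD y i 0 + PySem.List.pyGetD r i 0 + 1) 0),
       ((st.2.1.insert (PySem.List.pyGetD y i 0 - PySem.List.pyGetD r i 0) 0).insert (PySem.List.pyGetD y i 0 + PySem.List.pyGetD r i 0 + 1) 0),
       ((st.2.2.insert (PySem.List.pyGetD y i 0 - PySem.List.pyGetD r i 0) (-1)).insert (PySem.List.pyGetD y i 0 + PySem.List.pyGetD r i 0 + 1) (-1))))
      (PySem.Dict.empty, PySem.Dict.empty, PySem.Dict.empty)) =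
      ((PySem.List.pyRange 0 m 1).foldl (fun d i => (d.insert (pvStepA y r i) 0).insert (pvStepB y r i) 0) PySem.Dict.empty,
       (PySem.List.pyRange 0 m 1).foldl (fun d i => (d.insert (pvStepA y r i) 0).insert (pvStepB y r i) 0) PySem.Dict.empty,
       (PySem.List.pyRange 0 m 1).foldl (fun d i => (d.insert (pvStepA y r i) (-1)).insert (pvStepB y r i) (-1)) PySem.Dict.empty) := by
    simp only [pvStepA, pvStepB]
    rw [PySem.List.foldl_prod_mk
        (f := fun (d : PySem.Dict Int Int) i => (d.insert (PySem.List.pyGetD y i 0 - PySem.List.pyGetD r i 0) 0).insert (PySem.List.pyGetD y i 0 + PySem.List.pyGetD r i 0 + 1) 0)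
        (g := fun (st : PySem.Dict Int Int × PySem.Dict Int Int) i =>
          ((st.1.insert (PySem.List.pyGetD y i 0 - PySem.List.pyGetD r i 0) 0).insert (PySem.List.pyGetD y i 0 + PySem.List.pyGetD r i 0 + 1) 0,
           (st.2.insert (PySem.List.pyGetD y i 0 - PySem.List.pyGetD r i 0) (-1)).insert (PySem.List.pyGetD y i 0 + PySem.List.pyGetD r i 0 + 1) (-1)))]
    rw [PySem.List.foldl_prod_mk
        (f := fun (d : PySem.Dict Int Int) i => (d.insert (PySem.List.pyGetD y i 0 - PySem.List.pyGetD r i 0) 0).insert (PySem.List.pyGetD y i 0 + PySem.List.pyGetD r i 0 + 1) 0)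
        (g := fun (d : PySem.Dict Int Int) i => (d.insert (PySem.List.pyGetD y i 0 - PySem.List.pyGetD r i 0) (-1)).insert (PySem.List.pyGetD y i 0 + PySem.List.pyGetD r i 0 + 1) (-1))]
  rw [h1]
  have h2 : ∀ (d1 d2 d3 : PySem.Dict Int Int),
      ((PySem.List.pyRange 0 n 1).foldl (fun (st : PySem.Dict Int Int × PySem.Dict Int Int × PySem.Dict Int Int) i =>
        ((st.1.insert (PySem.List.pyGetD x i 0) 0), (st.2.1.insert (PySem.List.pyGetD x i 0) 0),
         (st.2.2.insert (PySem.List.pyGetD x i 0) 1))) (d1, d2, d3)) =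
      ((PySem.List.pyRange 0 n 1).foldl (fun d i => d.insert (PySem.List.pyGetD x i 0) 0) d1,
       (PySem.List.pyRange 0 n 1).foldl (fun d i => d.insert (PySem.List.pyGetD x i 0) 0) d2,
       (PySem.List.pyRange 0 n 1).foldl (fun d i => d.insert (PySem.List.pyGetD x i 0) 1) d3) := by
    intro d1 d2 d3
    rw [PySem.List.foldl_prod_mk
        (f := fun (d : PySem.Dict Int Int) i => d.insert (PySem.List.pyGetD x i 0) 0)
        (g := fun (st : PySem.Dict Int Int × PySem.Dict Int Int) i =>
          (st.1.insert (PySem.List.pyGetD x i 0) 0, st.2.insert (PySem.List.pyGetD x i 0) 1))]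
    rw [PySem.List.foldl_prod_mk
        (f := fun (d : PySem.Dict Int Int) i => d.insert (PySem.List.pyGetD x i 0) 0)
        (g := fun (d : PySem.Dict Int Int) i => d.insert (PySem.List.pyGetD x i 0) 1)]
  rw [h2]
  rfl

-- ---------- stage facts for port A ----------

theorem pv_sum_ones {β : Type} (l : List β) : (l.map (fun _ => (1 : Int))).sum = (l.length : Int) := by
  induction l with
  | nil => simp
  | cons b t ih =>
    simp only [List.map_cons, List.sum_cons, List.length_cons, ih]
    push_cast
    ring

theorem pv_sum_map_sub (l : List Int) (f g : Int → Int) :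
    (l.map (fun k => f k - g k)).sum = (l.map f).sum - (l.map g).sum := by
  induction l with
  | nil => simp
  | cons b t ih =>
    simp only [List.map_cons, List.sum_cons, ih]
    ring

theorem pv_D1_getD (n : Int) (x : List Int) (m : Int) (y r : List Int) :
    ∀ k, (pvD1 n x m y r).getD k 0 = 0 := by
  unfold pvD1
  exact pv_getD_insert1_zero _ _ _
    (pv_getD_insert2_zero _ _ _ _ (fun k => PySem.Dict.getD_empty k 0))

theorem pv_D1_mem (n : Int) (x : List Int) (m : Int) (y r : List Int) :
    ∀ k, k ∈ (pvD1 n x m y r).keys ↔ pvKP n x m y r k := by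
  intro k
  unfold pvD1 pvKP
  rw [pv_mem_keys_insert1, pv_mem_keys_insert2]
  simp only [PySem.Dict.keys_empty]
  simp

theorem pv_D1_nodup (n : Int) (x : List Int) (m : Int) (y r : List Int) :
    (pvD1 n x m y r).keys.Nodup := by
  unfold pvD1
  exact pv_nodup_keys_insert1 _ _ _ _
    (pv_nodup_keys_insert2 _ _ _ _ _ _ PySem.Dict.nodup_keys_empty)

def pvDelta (m : Int) (y r : List Int) (k : Int) : Int :=
  ((pvStarts m y r).count k : Int) - ((pvEnds m y r).count k : Int)

theorem pv_Pos1_getD (n : Int) (x : List Int) (m : Int) (y r : List Int) :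
    ∀ k, (pvPos1 n x m y r).getD k 0 = pvDelta m y r k := by
  intro k
  unfold pvPos1 pvDelta pvStarts pvEnds
  rw [pv_getD_modify2, pv_D1_getD]
  rw [List.count_eq_countP, List.count_eq_countP, List.countP_map, List.countP_map]
  simp only [pvStepA, pvStepB, Function.comp]
  rw [zero_add]
  rfl

theorem pv_Pos1_mem (n : Int) (x : List Int) (m : Int) (y r : List Int) :
    ∀ k, k ∈ (pvPos1 n x m y r).keys ↔ pvKP n x m y r k := by
  intro k
  unfold pvPos1
  rw [pv_mem_keys_modify2]
  rw [pv_D1_mem]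
  unfold pvKP
  constructor
  · rintro (h | h)
    · exact h
    · exact Or.inl h
  · exact Or.inl

theorem pv_Pos1_nodup (n : Int) (x : List Int) (m : Int) (y r : List Int) :
    (pvPos1 n x m y r).keys.Nodup := by
  unfold pvPos1
  exact pv_nodup_keys_modify2 _ _ _ _ _ _ _ _ (pv_D1_nodup n x m y r)

theorem pv_Ks_mem (n : Int) (x : List Int) (m : Int) (y r : List Int) :
    ∀ k, k ∈ pvKs n x m y r ↔ pvKP n x m y r k := by
  intro k
  unfold pvKs
  rw [PySem.List.mem_sorted]
  exact pv_Pos1_mem n x m y r k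

theorem pv_Ks_lt (n : Int) (x : List Int) (m : Int) (y r : List Int) :
    (pvKs n x m y r).Pairwise (· < ·) := by
  have hle : (pvKs n x m y r).Pairwise (· ≤ ·) := by
    simpa using PySem.List.sorted_pairwise (pvPos1 n x m y r).keys (fun k => k)
  have hnd : (pvKs n x m y r).Nodup :=
    ((PySem.List.sorted_perm (pvPos1 n x m y r).keys (fun k => k) false).nodup_iff).mpr
      (pv_Pos1_nodup n x m y r)
  exact (hle.and hnd).imp (fun h => lt_of_le_of_ne h.1 h.2)

theorem pv_count_bucket (K' : List Int) (hnd : K'.Nodup) (S : List Int) (v : Int)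
    (hS : ∀ s ∈ S, s ≤ v → s ∈ K') (hK : ∀ k ∈ K', k ≤ v) :
    (K'.map (fun k => (S.count k : Int))).sum = (S.countP (fun s => decide (s ≤ v)) : Int) := by
  have hmc : ∀ k ∈ K', (S.count k : Int)
      = (((S.filter (fun s => decide (s ≤ v))).filter (fun j => j == k)).map (fun _ => (1 : Int))).sum := by
    intro k hk
    rw [pv_sum_ones, ← List.countP_eq_length_filter, ← List.count_eq_countP,
        List.count_filter (by simpa using hK k hk)]
  rw [List.map_congr_left hmc,
      pv_sum_buckets K' hnd (S.filter (fun s => decide (s ≤ v))) (fun j => j) (fun _ => (1 : Int))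
        (fun s hs => hS s (List.mem_filter.mp hs).1 (by simpa using (List.mem_filter.mp hs).2)),
      pv_sum_ones, List.countP_eq_length_filter]

theorem pv_Pos2_cnt (n : Int) (x : List Int) (m : Int) (y r : List Int) :
    ∀ k ∈ pvKs n x m y r, (pvPos2 n x m y r).getD k 0 = pvCnt m y r k := by
  intro k hk
  unfold pvPos2
  rw [pv_prefix_fold (pvKs n x m y r) (pv_Ks_lt n x m y r) (pvDelta m y r) _
      (fun k' _ => pv_Pos1_getD n x m y r k') k hk]
  unfold pvDelta pvCnt
  rw [pv_sum_map_sub]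
  have hndf : ((pvKs n x m y r).filter (fun k' => decide (k' ≤ k))).Nodup :=
    ((pv_Ks_lt n x m y r).imp ne_of_lt).filter _
  have hKle : ∀ k' ∈ (pvKs n x m y r).filter (fun k' => decide (k' ≤ k)), k' ≤ k := by
    intro k' hk'
    simpa using (List.mem_filter.mp hk').2
  rw [pv_count_bucket _ hndf (pvStarts m y r) k ?hs hKle,
      pv_count_bucket _ hndf (pvEnds m y r) k ?he hKle]
  case hs =>
    intro s hs hsle
    refine List.mem_filter.mpr ⟨(pv_Ks_mem n x m y r s).mpr ?_, by simpa using hsle⟩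
    unfold pvStarts at hs
    obtain ⟨i, hi, rfl⟩ := List.mem_map.mp hs
    exact Or.inl ⟨i, hi, Or.inl rfl⟩
  case he =>
    intro s hs hsle
    refine List.mem_filter.mpr ⟨(pv_Ks_mem n x m y r s).mpr ?_, by simpa using hsle⟩
    unfold pvEnds at hs
    obtain ⟨i, hi, rfl⟩ := List.mem_map.mp hs
    exact Or.inl ⟨i, hi, Or.inr rfl⟩

-- the town-loop stage, split into dict and accumulator
set_option maxHeartbeats 1000000 in
theorem pv_T3_eq (n : Int) (p x : List Int) (m : Int) (y r : List Int) :
    pvT3 n p x m y r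
      = ((PySem.List.pyRange 0 n 1).foldl (fun d i =>
            if (pvPos2 n x m y r).getD (PySem.List.pyGetD x i 0) 0 = 0
                ∨ (pvPos2 n x m y r).getD (PySem.List.pyGetD x i 0) 0 = 1 then
              d.modify (PySem.List.pyGetD x i 0) 0 (· + PySem.List.pyGetD p i 0) else d) (pvD1 n x m y r),
         0 + (((PySem.List.pyRange 0 n 1).filter
              (fun i => decide ((pvPos2 n x m y r).getD (PySem.List.pyGetD x i 0) 0 = 0))).map
            (fun i => PySem.List.pyGetD p i 0)).sum) := by
  unfold pvT3
  exact pv_town_loop (PySem.List.pyRange 0 n 1)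
    (fun i => (pvPos2 n x m y r).getD (PySem.List.pyGetD x i 0) 0 = 0)
    (fun i => (pvPos2 n x m y r).getD (PySem.List.pyGetD x i 0) 0 = 1)
    (fun i => PySem.List.pyGetD x i 0) (fun i => PySem.List.pyGetD p i 0) (pvD1 n x m y r) 0

theorem pv_T3_snd (n : Int) (p x : List Int) (m : Int) (y r : List Int) :
    (pvT3 n p x m y r).2 = pvBase n p x m y r := by
  rw [pv_T3_eq]
  unfold pvBase
  simp only [zero_add]
  refine congrArg List.sum (congrArg (List.map fun j => PySem.List.pyGetD p j 0) ?_)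
  apply List.filter_congr
  intro j hj
  rw [PySem.List.mem_pyRange_one] at hj
  have hmem : PySem.List.pyGetD x j 0 ∈ pvKs n x m y r :=
    (pv_Ks_mem n x m y r _).mpr (Or.inr ⟨j, PySem.List.mem_pyRange_one.mpr hj, rfl⟩)
  rw [pv_Pos2_cnt n x m y r _ hmem]

def pvG (n : Int) (p x : List Int) (m : Int) (y r : List Int) (k : Int) : Int :=
  (((PySem.List.pyRange 0 n 1).filter (fun i =>
      decide ((pvPos2 n x m y r).getD (PySem.List.pyGetD x i 0) 0 = 0
              ∨ (pvPos2 n x m y r).getD (PySem.List.pyGetD x i 0) 0 = 1)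
        && (PySem.List.pyGetD x i 0 == k))).map (fun i => PySem.List.pyGetD p i 0)).sum

theorem pv_Pop1_getD (n : Int) (p x : List Int) (m : Int) (y r : List Int) :
    ∀ k, (pvT3 n p x m y r).1.getD k 0 = pvG n p x m y r k := by
  intro k
  rw [pv_T3_eq]
  unfold pvG
  rw [pv_getD_modify_add, pv_D1_getD, zero_add]

theorem pv_Pop1_mem (n : Int) (p x : List Int) (m : Int) (y r : List Int) :
    ∀ k, k ∈ (pvT3 n p x m y r).1.keys ↔ pvKP n x m y r k := by
  intro k
  rw [pv_T3_eq]
  simp only []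
  rw [pv_mem_keys_modify_add, pv_D1_mem]
  constructor
  · rintro (h | ⟨i, hi, _, hk⟩)
    · exact h
    · exact Or.inr ⟨i, hi, hk⟩
  · exact Or.inl

theorem pv_Pop1_nodup (n : Int) (p x : List Int) (m : Int) (y r : List Int) :
    (pvT3 n p x m y r).1.keys.Nodup := by
  rw [pv_T3_eq]
  exact pv_nodup_keys_modify_add _ _ _ _ _ (pv_D1_nodup n x m y r)

theorem pv_Ks2_mem (n : Int) (p x : List Int) (m : Int) (y r : List Int) :
    ∀ k, k ∈ pvKs2 n p x m y r ↔ pvKP n x m y r k := by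
  intro k
  unfold pvKs2
  rw [PySem.List.mem_sorted]
  exact pv_Pop1_mem n p x m y r k

theorem pv_Ks2_lt (n : Int) (p x : List Int) (m : Int) (y r : List Int) :
    (pvKs2 n p x m y r).Pairwise (· < ·) := by
  have hle : (pvKs2 n p x m y r).Pairwise (· ≤ ·) := by
    simpa using PySem.List.sorted_pairwise (pvT3 n p x m y r).1.keys (fun k => k)
  have hnd : (pvKs2 n p x m y r).Nodup :=
    ((PySem.List.sorted_perm (pvT3 n p x m y r).1.keys (fun k => k) false).nodup_iff).mpr
      (pv_Pop1_nodup n p x m y r)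
  exact (hle.and hnd).imp (fun h => lt_of_le_of_ne h.1 h.2)

set_option maxHeartbeats 1000000 in
theorem pv_Pop2_sval (n : Int) (p x : List Int) (m : Int) (y r : List Int) :
    ∀ v ∈ pvKs2 n p x m y r, (pvPop2 n p x m y r).getD v 0 = pvSval n p x m y r v := by
  intro v hv
  unfold pvPop2
  rw [pv_prefix_fold (pvKs2 n p x m y r) (pv_Ks2_lt n p x m y r) (pvG n p x m y r) _
      (fun k' _ => pv_Pop1_getD n p x m y r k') v hv]
  -- each bucket of pvG restricted to keys ≤ v
  have hvle : ∀ k ∈ (pvKs2 n p x m y r).filter (fun k' => decide (k' ≤ v)), k ≤ v := by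
    intro k hk
    simpa using (List.mem_filter.mp hk).2
  have hndf : ((pvKs2 n p x m y r).filter (fun k' => decide (k' ≤ v))).Nodup :=
    ((pv_Ks2_lt n p x m y r).imp ne_of_lt).filter _
  set l := (PySem.List.pyRange 0 n 1).filter (fun j =>
      decide ((pvPos2 n x m y r).getD (PySem.List.pyGetD x j 0) 0 = 0
              ∨ (pvPos2 n x m y r).getD (PySem.List.pyGetD x j 0) 0 = 1)
        && decide (PySem.List.pyGetD x j 0 ≤ v)) with hl
  have hmc : ∀ k ∈ (pvKs2 n p x m y r).filter (fun k' => decide (k' ≤ v)),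
      pvG n p x m y r k
        = ((l.filter (fun j => PySem.List.pyGetD x j 0 == k)).map (fun j => PySem.List.pyGetD p j 0)).sum := by
    intro k hk
    have hkv : k ≤ v := hvle k hk
    rw [hl, List.filter_filter]
    unfold pvG
    refine congrArg List.sum (congrArg (List.map fun j => PySem.List.pyGetD p j 0) ?_)
    apply List.filter_congr
    intro j _
    by_cases hx : PySem.List.pyGetD x j 0 = k
    · simp [hx, hkv, Bool.and_comm]
    · have hff : (PySem.List.pyGetD x j 0 == k) = false := by simp [hx]
      simp [hff]
  rw [List.map_congr_left hmc,
      pv_sum_buckets _ hndf l (fun j => PySem.List.pyGetD x j 0) (fun j => PySem.List.pyGetD p j 0) ?hin]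
  case hin =>
    intro j hj
    rw [hl] at hj
    have hj1 := (List.mem_filter.mp hj).1
    have hj2 := (List.mem_filter.mp hj).2
    refine List.mem_filter.mpr ⟨(pv_Ks2_mem n p x m y r _).mpr (Or.inr ⟨j, hj1, rfl⟩), ?_⟩
    simp only [Bool.and_eq_true] at hj2
    simpa using hj2.2
  -- identify the filtered sum with pvSval
  rw [hl]
  unfold pvSval
  refine congrArg List.sum (congrArg (List.map fun j => PySem.List.pyGetD p j 0) ?_)
  apply List.filter_congr
  intro j hj
  rw [PySem.List.mem_pyRange_one] at hj
  have hmem : PySem.List.pyGetD x j 0 ∈ pvKs n x m y r :=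
    (pv_Ks_mem n x m y r _).mpr (Or.inr ⟨j, PySem.List.mem_pyRange_one.mpr hj, rfl⟩)
  rw [pv_Pos2_cnt n x m y r _ hmem]
  unfold pvCond
  by_cases h0 : pvCnt m y r (PySem.List.pyGetD x j 0) = 0 <;>
    by_cases h1 : pvCnt m y r (PySem.List.pyGetD x j 0) = 1 <;> simp [h0, h1]

set_option maxHeartbeats 1000000 in
theorem pv_A_eq_final (n : Int) (p x : List Int) (m : Int) (y r : List Int) :
    maximumPeople n p x m y r = pvFinal n p x m y r := by
  rw [pv_A_unfold]
  unfold pvFinal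
  rw [pv_T3_snd]
  apply PySem.List.foldl_congr_mem
  intro acc i hi
  rw [PySem.List.mem_pyRange_one] at hi
  have hmb : PySem.List.pyGetD y i 0 + PySem.List.pyGetD r i 0 + 1 ∈ pvKs2 n p x m y r :=
    (pv_Ks2_mem n p x m y r _).mpr (Or.inl ⟨i, PySem.List.mem_pyRange_one.mpr hi, Or.inr rfl⟩)
  have hma : PySem.List.pyGetD y i 0 - PySem.List.pyGetD r i 0 ∈ pvKs2 n p x m y r :=
    (pv_Ks2_mem n p x m y r _).mpr (Or.inl ⟨i, PySem.List.mem_pyRange_one.mpr hi, Or.inl rfl⟩)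
  rw [pv_Pop2_sval n p x m y r _ hmb, pv_Pop2_sval n p x m y r _ hma]
  simp only []
  rw [add_comm (pvSval n p x m y r (PySem.List.pyGetD y i 0 + PySem.List.pyGetD r i 0 + 1)
        - pvSval n p x m y r (PySem.List.pyGetD y i 0 - PySem.List.pyGetD r i 0))
      (pvBase n p x m y r)]

theorem pv_B_eq_final (n : Int) (p x : List Int) (m : Int) (y r : List Int) :
    maximumPeople_alt n p x m y r = pvFinal n p x m y r := by
  unfold maximumPeople_alt pvFinal
  simp only []
  -- names for the intermediate lists
  set S0 := (PySem.List.pyRange 0 m 1).map (fun i => PySem.List.pyGetD y i 0 - PySem.List.pyGetD r i 0) with hS0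
  set E0 := (PySem.List.pyRange 0 m 1).map (fun i => PySem.List.pyGetD y i 0 + PySem.List.pyGetD r i 0 + 1) with hE0
  set starts := PySem.List.sorted S0 (fun v => v) false with hstarts
  set ends := PySem.List.sorted E0 (fun v => v) false with hends
  -- bisecting the sorted event lists computes pvCnt
  have hcnt : ∀ v : Int, (PySem.List.bisectRight starts v : Int) - (PySem.List.bisectRight ends v : Int)
      = pvCnt m y r v := by
    intro v
    have h1 : PySem.List.bisectRight starts v = S0.countP (fun s => decide (s ≤ v)) := by
      rw [pv_bisect_count starts (by simpa using PySem.List.sorted_pairwise S0 (fun v => v)) v]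
      exact (PySem.List.sorted_perm S0 (fun v => v) false).countP_eq _
    have h2 : PySem.List.bisectRight ends v = E0.countP (fun s => decide (s ≤ v)) := by
      rw [pv_bisect_count ends (by simpa using PySem.List.sorted_pairwise E0 (fun v => v)) v]
      exact (PySem.List.sorted_perm E0 (fun v => v) false).countP_eq _
    rw [h1, h2]
    rfl
  set counts := (PySem.List.pyRange 0 n 1).map (fun j =>
      (PySem.List.bisectRight starts (PySem.List.pyGetD x j 0) : Int)
        - (PySem.List.bisectRight ends (PySem.List.pyGetD x j 0) : Int)) with hcounts
  have hcj : ∀ j : Int, 0 ≤ j → j < n → PySem.List.pyGetD counts j 0 = pvCnt m y r (PySem.List.pyGetD x j 0) := by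
    intro j h0 hn
    rw [hcounts, PySem.List.pyGetD_map_pyRange_of_nonneg _ n j 0 h0 hn]
    exact hcnt _
  -- base
  have hbase : ((PySem.List.pyRange 0 n 1).foldl
      (fun s j => if PySem.List.pyGetD counts j 0 = 0 then s + PySem.List.pyGetD p j 0 else s) 0)
      = pvBase n p x m y r := by
    rw [PySem.List.foldl_congr_mem _
      (g := fun s j => if decide (pvCnt m y r (PySem.List.pyGetD x j 0) = 0) = true
                       then s + PySem.List.pyGetD p j 0 else s) _ _ ?_]
    · rw [PySem.List.foldl_if_eq_foldl_filter, PySem.List.foldl_add]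
      simp [pvBase]
    · intro acc j hj
      rw [PySem.List.mem_pyRange_one] at hj
      rw [hcj j hj.1 hj.2]
      simp
  rw [hbase]
  -- light list: align the filter with pvCond
  have hfilter : (PySem.List.pyRange 0 n 1).filter
        (fun j => decide (0 ≤ PySem.List.pyGetD counts j 0) && decide (PySem.List.pyGetD counts j 0 ≤ 1))
      = (PySem.List.pyRange 0 n 1).filter (fun j => pvCond m y r x j) := by
    apply List.filter_congr
    intro j hj
    rw [PySem.List.mem_pyRange_one] at hj
    rw [hcj j hj.1 hj.2]
    unfold pvCond
    by_cases h0 : pvCnt m y r (PySem.List.pyGetD x j 0) = 0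
    · simp [h0]
    · by_cases h1 : pvCnt m y r (PySem.List.pyGetD x j 0) = 1
      · simp [h0, h1]
      · have hno : ¬ (0 ≤ pvCnt m y r (PySem.List.pyGetD x j 0)) ∨ ¬ (pvCnt m y r (PySem.List.pyGetD x j 0) ≤ 1) := by omega
        rcases hno with h | h <;> simp [h, h0, h1]
  rw [hfilter]
  set L0 := ((PySem.List.pyRange 0 n 1).filter (fun j => pvCond m y r x j)).map
      (fun j => (PySem.List.pyGetD x j 0, PySem.List.pyGetD p j 0)) with hL0
  set light := PySem.List.sorted L0 (fun t => t.1) false with hlight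
  -- the window sums
  have hW : ∀ v : Int,
      PySem.List.pyGetD (List.scanl (· + ·) 0 (light.map (fun t => t.2)))
        ((PySem.List.bisectRight (light.map (fun t => t.1)) v : Nat) : Int) 0
      = pvSval n p x m y r v := by
    intro v
    have hxs : (light.map (fun t => t.1)).Pairwise (· ≤ ·) := by
      simpa using PySem.List.sorted_map_key_pairwise L0 (fun t => t.1)
    have hb : PySem.List.bisectRight (light.map (fun t => t.1)) v
        = light.countP (fun t => decide (t.1 ≤ v)) := by
      rw [pv_bisect_count _ hxs v, List.countP_map]
      rfl
    have hlen : light.countP (fun t => decide (t.1 ≤ v)) ≤ (light.map (fun t => t.2)).length := by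
      rw [List.length_map]
      exact List.countP_le_length
    rw [hb, PySem.List.pyGetD_natCast, pv_scanl_getD _ _ _ hlen]
    rw [← List.map_take, pv_take_countP (fun t => t.1) light (PySem.List.sorted_pairwise L0 (fun t => t.1)) v]
    have hperm : (light.filter (fun t => decide (t.1 ≤ v))).Perm (L0.filter (fun t => decide (t.1 ≤ v))) :=
      (PySem.List.sorted_perm L0 (fun t => t.1) false).filter _
    rw [(hperm.map (fun t : Int × Int => t.2)).sum_eq]
    rw [hL0, List.filter_map, List.map_map, List.filter_filter]
    have hfc : (PySem.List.pyRange 0 n 1).filter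
          (fun j => ((fun t : Int × Int => decide (t.1 ≤ v)) ∘ (fun j => (PySem.List.pyGetD x j 0, PySem.List.pyGetD p j 0))) j
                     && pvCond m y r x j)
        = (PySem.List.pyRange 0 n 1).filter
          (fun j => pvCond m y r x j && decide (PySem.List.pyGetD x j 0 ≤ v)) := by
      apply List.filter_congr
      intro j _
      simp [Function.comp, Bool.and_comm]
    rw [hfc]
    simp only [pvSval, zero_add]
    rfl
  -- final fold
  apply PySem.List.foldl_congr_mem
  intro acc i _
  rw [hW, hW]



-- ===== VERDICT (by name: the statement is the Claim_ definition above) =====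
theorem maximumPeople_spec : Claim_equal_maximumPeople := by
  intro n p x m y r _ _
  unfold Spec_maximumPeople
  rw [pv_A_eq_final, pv_B_eq_final]
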